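-- pv_equiv track=rewrite | github.com/mattmarenghi/roster-maker | enrich_player_profiles.py | score_school
-- ===== SOURCE A (Python) =====
-- def score_school(players_in_school):
--     """
--     Compute an enrichment priority score for a school.
--     Higher = more worth visiting.
--     """
--     score = 0
--     for p in players_in_school:
--         if p.get('profile_url'):
--             if not p.get('bt'):
--                 score += 3   # bt is most valuable (drives ID stability)
--             if not p.get('yr'):
--                 score += 1
--             if not p.get('wt'):
--                 score += 1
--             if not p.get('ht'):
--                 score += 1
--             if not p.get('hometown'):
--                 score += 2   # hometown also drives ID stability
--     return score
-- ===== SOURCE B (Python) =====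
-- def score_school(players_in_school):
--     """
--     Compute an enrichment priority score for a school.
--     Higher = more worth visiting.
--     """
--     eligible = [p for p in players_in_school if p.get('profile_url')]
--
--     def missing(field):
--         return sum(1 for p in eligible if not p.get(field))
--
--     return (3 * missing('bt')
--             + missing('yr')
--             + missing('wt')
--             + missing('ht')
--             + 2 * missing('hometown'))
-- ===== Notes on version B (the rewrite author's own statement) =====
-- stated objective: alternative
-- what changed: Swaps the loop nesting: instead of a single pass over players adding per-player branch weights, B filters the eligible players once and then runs independent per-field counting passes (count of players missing each field), combining the counts with their weights in a closed arithmetic expression.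
import Mathlib
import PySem

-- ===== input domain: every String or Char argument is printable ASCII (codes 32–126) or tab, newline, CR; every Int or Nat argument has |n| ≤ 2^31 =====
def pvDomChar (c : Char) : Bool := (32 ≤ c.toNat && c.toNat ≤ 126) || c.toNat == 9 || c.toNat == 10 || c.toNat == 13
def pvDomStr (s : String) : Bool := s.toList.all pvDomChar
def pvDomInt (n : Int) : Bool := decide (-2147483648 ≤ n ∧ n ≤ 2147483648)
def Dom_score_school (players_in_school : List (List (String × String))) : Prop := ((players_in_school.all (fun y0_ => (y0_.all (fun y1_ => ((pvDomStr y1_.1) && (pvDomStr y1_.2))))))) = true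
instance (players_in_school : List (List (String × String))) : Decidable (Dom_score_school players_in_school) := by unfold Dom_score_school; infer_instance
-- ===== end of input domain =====

-- B swaps the loop nesting: it filters eligible players once, then counts missing players per field and weights the counts; same O(n) cost, an alternative decomposition.


-- truthiness of p.get(k): a present, non-empty string (exact for string-valued dicts)
def pvTruthyGet (p : List (String × String)) (k : String) : Bool :=
  match p.lookup k with
  | some s => !(s == "")
  | none => false

-- ===== PORT A =====
def score_school (players_in_school : List (List (String × String))) : Int :=
  players_in_school.foldl
    (fun score p =>
      if pvTruthyGet p "profile_url" then
        let score := if !pvTruthyGet p "bt" then score + 3 else score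
        let score := if !pvTruthyGet p "yr" then score + 1 else score
        let score := if !pvTruthyGet p "wt" then score + 1 else score
        let score := if !pvTruthyGet p "ht" then score + 1 else score
        let score := if !pvTruthyGet p "hometown" then score + 2 else score
        score
      else score)
    0

-- ===== PORT B =====
-- number of eligible players missing a given field (Python's per-field counting pass)
def pvMissing (eligible : List (List (String × String))) (field : String) : Int :=
  (eligible.countP (fun p => !pvTruthyGet p field) : Int)

def score_school_alt (players_in_school : List (List (String × String))) : Int :=
  let eligible := players_in_school.filter (fun p => pvTruthyGet p "profile_url")
  3 * pvMissing eligible "bt"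
    + pvMissing eligible "yr"
    + pvMissing eligible "wt"
    + pvMissing eligible "ht"
    + 2 * pvMissing eligible "hometown"

-- ===== PRECONDITION & SPEC =====
def Spec_score_school (players_in_school : List (List (String × String))) (out : Int) : Prop := out = score_school_alt players_in_school
instance (players_in_school : List (List (String × String))) (out : Int) : Decidable (Spec_score_school players_in_school out) := by unfold Spec_score_school; infer_instance

-- ===== CLAIM (what is proved, stated in full; the proofs are below) =====
def Claim_equal_score_school : Prop := ∀ (players_in_school : List (List (String × String))), Dom_score_school players_in_school → Spec_score_school players_in_school (score_school players_in_school)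

-- ===== LEMMAS AND PROOFS =====

lemma foldl_eq_alt (ps : List (List (String × String))) (acc : Int) :
    ps.foldl
      (fun score p =>
        if pvTruthyGet p "profile_url" then
          let s := if !pvTruthyGet p "bt" then score + 3 else score
          let s := if !pvTruthyGet p "yr" then s + 1 else s
          let s := if !pvTruthyGet p "wt" then s + 1 else s
          let s := if !pvTruthyGet p "ht" then s + 1 else s
          let s := if !pvTruthyGet p "hometown" then s + 2 else s
          s
        else score)
      acc = acc + score_school_alt ps := by
  induction ps generalizing acc with
  | nil => simp [score_school_alt, pvMissing]
  | cons p ps ih =>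
    simp only [List.foldl_cons]
    rw [ih]
    simp only [score_school_alt, pvMissing, List.filter_cons]
    by_cases hp : pvTruthyGet p "profile_url" <;>
      simp only [hp, if_pos, if_neg, Bool.false_eq_true, not_false_iff, ite_true, ite_false,
        List.countP_cons] <;>
      by_cases h1 : pvTruthyGet p "bt" <;>
      by_cases h2 : pvTruthyGet p "yr" <;>
      by_cases h3 : pvTruthyGet p "wt" <;>
      by_cases h4 : pvTruthyGet p "ht" <;>
      by_cases h5 : pvTruthyGet p "hometown" <;>
      simp [h1, h2, h3, h4, h5] <;> push_cast <;> ring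

-- ===== VERDICT (by name: the statement is the Claim_ definition above) =====
theorem score_school_spec : Claim_equal_score_school := by
  intro ps _
  unfold Spec_score_school score_school
  rw [foldl_eq_alt]
  ring
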